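-- pv_equiv track=rewrite | github.com/BeataStultica/WebDataScanner | cleaners.py | strip_letters
-- ===== SOURCE A (Python) =====
-- def strip_letters(raw, letters):
--     iraw = 0
--     ilets = 0
--     while letters[ilets:] and raw[iraw:]:
--         if raw[iraw].lower() == letters[ilets].lower():
--             ilets += 1
--         iraw += 1
--     return raw[iraw:]
-- ===== SOURCE B (Python) =====
-- def strip_letters(raw, letters):
--     # Build a per-character index once: lowercase char -> ascending list of its
--     # positions in raw; keep a per-character cursor into each list so every
--     # indexed position is examined at most once overall (amortized O(n+m)),
--     # with no scan over raw's characters at all.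
--     occ = {}
--     for i, ch in enumerate(raw):
--         occ.setdefault(ch.lower(), []).append(i)
--     cur = {}
--     iraw = 0
--     for letter in letters:
--         lo = letter.lower()
--         pos = occ.get(lo, ())
--         k = cur.get(lo, 0)
--         while k < len(pos) and pos[k] < iraw:
--             k += 1
--         if k == len(pos):
--             return ""
--         iraw = pos[k] + 1
--         cur[lo] = k + 1
--     return raw[iraw:]
-- ===== Notes on version B (the rewrite author's own statement) =====
-- stated objective: faster
-- what changed: A scans raw character by character (re-slicing both strings in its loop condition); B builds a per-character occurrence index once (dict lowercase char -> ascending positions) and walks letters with per-character cursors, consuming the first indexed position at or after the cursor, so the character scan of raw disappears.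
import Mathlib
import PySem

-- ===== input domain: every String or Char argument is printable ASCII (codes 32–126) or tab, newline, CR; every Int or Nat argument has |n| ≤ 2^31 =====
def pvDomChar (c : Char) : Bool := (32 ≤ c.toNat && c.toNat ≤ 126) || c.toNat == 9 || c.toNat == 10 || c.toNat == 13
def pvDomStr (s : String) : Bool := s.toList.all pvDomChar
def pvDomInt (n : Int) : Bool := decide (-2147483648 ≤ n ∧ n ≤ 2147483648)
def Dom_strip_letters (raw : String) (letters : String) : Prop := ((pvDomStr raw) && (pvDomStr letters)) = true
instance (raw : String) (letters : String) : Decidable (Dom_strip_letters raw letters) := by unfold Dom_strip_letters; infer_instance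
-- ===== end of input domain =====

-- B replaces A's character-by-character scan of raw by a per-character occurrence
-- index (dict lowercase char -> ascending positions, built once) walked with
-- per-character cursors (objective: faster, measured).

-- ===== PORT A =====
-- A's while-loop: while letters nonempty and raw nonempty, advance the letters
-- cursor on a case-insensitive match and always advance the raw cursor; return the
-- rest of raw.  Char.toLower is exact for Python str.lower on the ASCII domain.
def stripLoopA : List Char → List Char → List Char
  | raw, [] => raw
  | [], _ :: _ => []
  | r :: rs, l :: ls =>
      if r.toLower == l.toLower then stripLoopA rs ls
      else stripLoopA rs (l :: ls)

def strip_letters (raw : String) (letters : String) : String :=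
  String.ofList (stripLoopA raw.toList letters.toList)

-- ===== PORT B =====
-- occ.setdefault(ch.lower(), []).append(i) over enumerate(raw)
def occBuild (l : List Char) : PySem.Dict Char (List Int) :=
  (PySem.List.enumerate l 0).foldl
    (fun d q => d.modify q.2.toLower [] (· ++ [q.1])) PySem.Dict.empty

-- the inner 'while k < len(pos) and pos[k] < iraw: k += 1', counted from the
-- cursor's suffix of the position list
def skipB (iraw : Int) : List Int → Nat
  | [] => 0
  | p :: ps => if p < iraw then skipB iraw ps + 1 else 0

-- the 'for letter in letters' loop; none = the early 'return ""'
def loopB (occ : PySem.Dict Char (List Int)) :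
    List Char → Int → PySem.Dict Char Nat → Option Int
  | [], iraw, _ => some iraw
  | l :: ls, iraw, cur =>
      let lo := l.toLower
      let pos := occ.getD lo []
      let k := cur.getD lo 0
      let k' := k + skipB iraw (pos.drop k)
      match pos.drop k' with
      | [] => none
      | p :: _ => loopB occ ls (p + 1) (cur.insert lo (k' + 1))

def strip_letters_alt (raw : String) (letters : String) : String :=
  match loopB (occBuild raw.toList) letters.toList 0 PySem.Dict.empty with
  | none => ""
  | some iraw => String.ofList (PySem.List.slice raw.toList (some iraw) none)

-- ===== PRECONDITION & SPEC =====
def Spec_strip_letters (raw : String) (letters : String) (out : String) : Prop := out = strip_letters_alt raw letters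
instance (raw : String) (letters : String) (out : String) : Decidable (Spec_strip_letters raw letters out) := by unfold Spec_strip_letters; infer_instance

-- ===== CLAIM (what is proved, stated in full; the proofs are below) =====
def Claim_equal_strip_letters : Prop := ∀ (raw : String) (letters : String), Dom_strip_letters raw letters → Spec_strip_letters raw letters (strip_letters raw letters)

-- ===== LEMMAS AND PROOFS =====

-- the position list occBuild yields for a lowercase character, with offset s
def occLs (c : Char) : List Char → Int → List Int :=
  fun l s => ((PySem.List.enumerate l s).filter (fun q => q.2.toLower == c)).map (·.1)

-- proof-side view of the cursor+skip mechanism: first indexed position ≥ iraw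
def findGE (iraw : Int) : List Int → Option Int
  | [] => none
  | p :: ps => if iraw ≤ p then some p else findGE iraw ps

theorem findGE_nil (iraw : Int) : findGE iraw [] = none := rfl

theorem findGE_cons (iraw p : Int) (ps : List Int) :
    findGE iraw (p :: ps) = if iraw ≤ p then some p else findGE iraw ps := rfl

theorem occBuild_getD (l : List Char) (c : Char) :
    (occBuild l).getD c [] = occLs c l 0 := by
  have h : occBuild l =
      ((PySem.List.enumerate l 0).map (fun q => (q.2.toLower, q.1))).foldl
        (fun d p => d.modify p.1 [] (· ++ [p.2])) PySem.Dict.empty := by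
    rw [List.foldl_map]
    rfl
  rw [h, PySem.Dict.getD_foldl_modify_append]
  simp [occLs, PySem.Dict.getD_empty, List.filter_map, List.map_map, Function.comp_def]

theorem occLs_cons (c x : Char) (xs : List Char) (s : Int) :
    occLs c (x :: xs) s =
      (if x.toLower == c then [s] else []) ++ occLs c xs (s + 1) := by
  by_cases h : x.toLower == c <;>
    simp [occLs, PySem.List.enumerate_cons, h]

-- findGE on the occurrence suffix starting at offset s = first match in the
-- dropped raw suffix
theorem findGE_occLs (c : Char) (l : List Char) (s i : Nat) :
    findGE (i : Int) (occLs c l (s : Int)) =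
      (List.findIdx? (fun ch => ch.toLower == c) (l.drop (i - s))).map
        (fun t => ((max i s + t : Nat) : Int)) := by
  induction l generalizing s with
  | nil => simp [occLs, findGE, PySem.List.enumerate_nil]
  | cons x xs ih =>
    have hs1 : ((s : Int) + 1) = ((s + 1 : Nat) : Int) := by push_cast; ring
    rw [occLs_cons, hs1]
    by_cases hm : x.toLower == c
    · rw [if_pos hm, List.singleton_append]
      by_cases his : i ≤ s
      · have h0 : i - s = 0 := by omega
        have hle : (i : Int) ≤ (s : Int) := by exact_mod_cast his
        simp [findGE_cons, hle, h0, List.findIdx?_cons, hm, Nat.max_eq_right his]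
      · have hlt : ¬ ((i : Int) ≤ (s : Int)) := by
          simpa using (by omega : ¬ i ≤ s)
        rw [findGE_cons, if_neg hlt, ih (s + 1)]
        have hd : (x :: xs).drop (i - s) = xs.drop (i - (s + 1)) := by
          have : i - s = (i - (s + 1)) + 1 := by omega
          rw [this]; rfl
        rw [hd]
        have : max i (s + 1) = max i s := by omega
        rw [this]
    · rw [if_neg hm, List.nil_append, ih (s + 1)]
      by_cases his : i ≤ s
      · have h0 : i - s = 0 := by omega
        have h0' : i - (s + 1) = 0 := by omega
        have hms : max i s = s := by omega
        have hms1 : max i (s + 1) = s + 1 := by omega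
        rw [h0, h0', List.drop_zero, List.drop_zero, List.findIdx?_cons]
        simp only [hm, hms, hms1, Bool.false_eq_true, if_false, Option.map_map]
        congr 1
        funext t
        simp only [Function.comp_apply]
        push_cast; ring
      · have hd : (x :: xs).drop (i - s) = xs.drop (i - (s + 1)) := by
          have : i - s = (i - (s + 1)) + 1 := by omega
          rw [this]; rfl
        rw [hd]
        have : max i (s + 1) = max i s := by omega
        rw [this]

-- everything skipB skips is < iraw, and it stops at the first element ≥ iraw
theorem skipB_take (iraw : Int) (l : List Int) :
    ∀ p ∈ l.take (skipB iraw l), p < iraw := by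
  induction l with
  | nil => simp
  | cons x xs ih =>
    by_cases h : x < iraw
    · simp only [skipB, if_pos h, List.take_succ_cons, List.mem_cons]
      rintro p (rfl | hp)
      · exact h
      · exact ih p hp
    · simp [skipB, if_neg h]

theorem skipB_drop_head (iraw : Int) (l : List Int) :
    ∀ p ∈ (l.drop (skipB iraw l)).head?, iraw ≤ p := by
  induction l with
  | nil => simp
  | cons x xs ih =>
    by_cases h : x < iraw
    · simpa [skipB, if_pos h] using ih
    · simp only [skipB, if_neg h, List.drop_zero, List.head?_cons, Option.mem_def,
        Option.some.injEq]
      rintro p rfl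
      omega

-- if everything before index k' is < iraw and the element at k' (if any) is
-- ≥ iraw, then the head of the suffix is exactly findGE
theorem head?_drop_eq_findGE (iraw : Int) :
    ∀ (pos : List Int) (k' : Nat),
      (∀ p ∈ pos.take k', p < iraw) →
      (∀ p ∈ (pos.drop k').head?, iraw ≤ p) →
      (pos.drop k').head? = findGE iraw pos := by
  intro pos
  induction pos with
  | nil => intro k' _ _; simp [findGE_nil]
  | cons x xs ih =>
    intro k' hlt hge
    cases k' with
    | zero =>
      have hx : iraw ≤ x := hge x (by simp)
      simp [findGE_cons, hx]
    | succ k =>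
      have hxlt : x < iraw := hlt x (by simp)
      have : findGE iraw (x :: xs) = findGE iraw xs := by
        simp [findGE_cons, not_le.mpr hxlt]
      rw [this]
      exact ih k (fun p hp => hlt p (by simp [hp])) hge

-- A's step: consuming up to and including the first case-insensitive match
theorem stripLoopA_step (l : Char) (ls : List Char) :
    ∀ r : List Char,
      stripLoopA r (l :: ls) =
        match List.findIdx? (fun ch => ch.toLower == l.toLower) r with
        | none => []
        | some t => stripLoopA (r.drop (t + 1)) ls := by
  intro r
  induction r with
  | nil => simp [stripLoopA]
  | cons c cs ih =>
    by_cases h : c.toLower == l.toLower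
    · simp [stripLoopA, h, List.findIdx?_cons]
    · rw [List.findIdx?_cons]
      simp only [h]
      rw [stripLoopA, if_neg (by simp_all), ih]
      cases hfi : List.findIdx? (fun ch => ch.toLower == l.toLower) cs <;>
        simp

-- cursor invariant: every indexed position below a character's cursor is < iraw
def InvB (occ : PySem.Dict Char (List Int)) (cur : PySem.Dict Char Nat)
    (iraw : Int) : Prop :=
  ∀ c : Char, ∀ p ∈ (occ.getD c []).take (cur.getD c 0), p < iraw

-- one unfolding step of loopB (the let-bindings zeta-reduced)
theorem loopB_cons (occ : PySem.Dict Char (List Int)) (l : Char) (ls : List Char)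
    (iraw : Int) (cur : PySem.Dict Char Nat) :
    loopB occ (l :: ls) iraw cur =
      match (occ.getD l.toLower []).drop
          (cur.getD l.toLower 0 +
            skipB iraw ((occ.getD l.toLower []).drop (cur.getD l.toLower 0))) with
      | [] => none
      | p :: _ =>
          loopB occ ls (p + 1)
            (cur.insert l.toLower
              (cur.getD l.toLower 0 +
                skipB iraw ((occ.getD l.toLower []).drop (cur.getD l.toLower 0)) + 1)) := rfl

theorem loopB_main (raw : List Char) :
    ∀ (ls : List Char) (i : Nat) (cur : PySem.Dict Char Nat),
      i ≤ raw.length → InvB (occBuild raw) cur (i : Int) →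
      (loopB (occBuild raw) ls (i : Int) cur = none ∧
        stripLoopA (raw.drop i) ls = []) ∨
      (∃ j : Nat, j ≤ raw.length ∧
        loopB (occBuild raw) ls (i : Int) cur = some ((j : Nat) : Int) ∧
        stripLoopA (raw.drop i) ls = raw.drop j) := by
  intro ls
  induction ls with
  | nil =>
    intro i cur hi _
    right
    exact ⟨i, hi, rfl, by cases hr : raw.drop i <;> simp [stripLoopA]⟩
  | cons l ls ih =>
    intro i cur hi hinv
    set occ := occBuild raw with hocc
    set pos := occ.getD l.toLower [] with hpos
    set k := cur.getD l.toLower 0 with hk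
    set k' := k + skipB (i : Int) (pos.drop k) with hk'
    -- everything before k' is < i
    have htake : ∀ p ∈ pos.take k', p < (i : Int) := by
      intro p hp
      rw [hk', List.take_add] at hp
      rcases List.mem_append.mp hp with h1 | h2
      · exact hinv l.toLower p h1
      · exact skipB_take _ _ p h2
    have hdrop : pos.drop k' = (pos.drop k).drop (skipB (i : Int) (pos.drop k)) := by
      rw [List.drop_drop]
    have hge : ∀ p ∈ (pos.drop k').head?, (i : Int) ≤ p := by
      rw [hdrop]; exact skipB_drop_head _ _
    have hfind : (pos.drop k').head? = findGE (i : Int) pos :=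
      head?_drop_eq_findGE _ pos k' htake hge
    have hpos_occ : pos = occLs l.toLower raw 0 := by
      rw [hpos, hocc, occBuild_getD]
    have hG : findGE (i : Int) pos =
        (List.findIdx? (fun ch => ch.toLower == l.toLower) (raw.drop i)).map
          (fun t => ((max i 0 + t : Nat) : Int)) := by
      rw [hpos_occ]
      exact_mod_cast findGE_occLs l.toLower raw 0 i
    rw [stripLoopA_step]
    cases hfi : List.findIdx? (fun ch => ch.toLower == l.toLower) (raw.drop i) with
    | none =>
      -- no match: loopB hits the empty suffix, A consumes everything
      have : (pos.drop k').head? = none := by rw [hfind, hG, hfi]; rfl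
      have hnil : pos.drop k' = [] := List.head?_eq_none_iff.mp this
      left
      refine ⟨?_, rfl⟩
      rw [loopB_cons]
      simp only [← hpos, ← hk, ← hk']
      rw [hnil]
    | some t =>
      -- match at raw-index i + t
      have hsome : (pos.drop k').head? = some ((i + t : Nat) : Int) := by
        rw [hfind, hG, hfi]; simp
      obtain ⟨rest, hrest⟩ : ∃ rest, pos.drop k' = ((i + t : Nat) : Int) :: rest := by
        cases h : pos.drop k' with
        | nil => rw [h] at hsome; simp at hsome
        | cons p ps =>
          rw [h] at hsome
          simp only [List.head?_cons, Option.some.injEq] at hsome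
          exact ⟨ps, by rw [hsome]⟩
      -- bound on t
      have ht : t < (raw.drop i).length := by
        rcases List.findIdx?_eq_some_iff_getElem.mp hfi with ⟨hlt, -⟩
        exact hlt
      have hlen : i + t + 1 ≤ raw.length := by
        rw [List.length_drop] at ht; omega
      -- the element at k' is the position i + t, below the new cursor
      have hk'len : k' < pos.length := by
        have : pos.drop k' ≠ [] := by rw [hrest]; simp
        by_contra h
        exact this (List.drop_eq_nil_of_le (by omega))
      have hsplit : pos = pos.take k' ++ ((i + t : Nat) : Int) :: rest := by
        conv_lhs => rw [← List.take_append_drop k' pos]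
        rw [hrest]
      -- new invariant
      have hinv' : InvB occ (cur.insert l.toLower (k' + 1)) ((i + t + 1 : Nat) : Int) := by
        intro c p hp
        by_cases hc : c = l.toLower
        · subst hc
          rw [PySem.Dict.getD_insert, if_pos rfl] at hp
          have htk : pos.take (k' + 1) = pos.take k' ++ [((i + t : Nat) : Int)] := by
            conv_lhs => rw [hsplit]
            rw [List.take_append]
            have : (pos.take k').length = k' := by
              rw [List.length_take]; omega
            rw [this, List.take_of_length_le (by rw [this]; omega)]
            simp
          rw [htk] at hp
          rcases List.mem_append.mp hp with h1 | h2
          · have := htake p h1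
            push_cast
            push_cast at this
            omega
          · simp only [List.mem_singleton] at h2
            subst h2
            push_cast
            omega
        · rw [PySem.Dict.getD_insert, if_neg hc] at hp
          have := hinv c p hp
          push_cast
          push_cast at this
          omega
      have hstep : loopB occ (l :: ls) (i : Int) cur =
          loopB occ ls (((i + t : Nat) : Int) + 1)
            (cur.insert l.toLower (k' + 1)) := by
        rw [loopB_cons]
        simp only [← hpos, ← hk, ← hk']
        rw [hrest]
      have hcast : (((i + t : Nat) : Int) + 1) = ((i + t + 1 : Nat) : Int) := by
        push_cast; ring
      have hdd : (raw.drop i).drop (t + 1) = raw.drop (i + t + 1) := by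
        rw [List.drop_drop, Nat.add_assoc]
      rw [hstep, hcast]
      dsimp only
      rw [hdd]
      exact ih (i + t + 1) (cur.insert l.toLower (k' + 1)) hlen hinv'

-- ===== VERDICT (by name: the statement is the Claim_ definition above) =====
theorem strip_letters_spec : Claim_equal_strip_letters := by
  intro raw letters _
  unfold Spec_strip_letters strip_letters strip_letters_alt
  have hinv0 : InvB (occBuild raw.toList) PySem.Dict.empty ((0 : Nat) : Int) := by
    intro c p hp
    simp [PySem.Dict.getD_empty] at hp
  have := loopB_main raw.toList letters.toList 0 PySem.Dict.empty
    (Nat.zero_le _) hinv0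
  rcases this with ⟨h1, h2⟩ | ⟨j, hj1, hj2, hj3⟩
  · rw [Nat.cast_zero] at h1
    rw [List.drop_zero] at h2
    rw [h1, h2]
  · rw [Nat.cast_zero] at hj2
    rw [List.drop_zero] at hj3
    rw [hj2, hj3]
    simp [PySem.List.slice_from]
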